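-- pv_equiv track=rewrite | github.com/olsenw/LeetCodeExercises | Python3/count_the_number_of_good_subarrays.py | countGood_fails
-- ===== SOURCE A (Python) =====
-- import bisect
-- from collections import Counter
-- from typing import List, Dict, Set, Optional
--
-- def countGood_fails(nums: List[int], k: int) -> int:
--     n = len(nums)
--     answer = 0
--     c = Counter(nums[:1])
--     pairs = [0]
--     for i in range(1,n):
--         c[nums[i]] += 1
--         pairs.append(pairs[-1] + c[nums[i]] - 1)
--     for i in range(n):
--         j = bisect.bisect_left(pairs, k - pairs[i])
--         if j < n and pairs[j] - pairs[i] >= k: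
--             answer += n - j
--     return answer
-- ===== SOURCE B (Python) =====
-- def countGood_fails(nums, k):
--     # Two pointers: the search target k - pairs[i] is nonincreasing in i,
--     # so the bisect index is found by walking j downwards once overall.
--     n = len(nums)
--     counts = {}
--     pairs = []
--     p = 0
--     for x in nums:
--         cnt = counts.get(x, 0) + 1
--         counts[x] = cnt
--         p += cnt - 1
--         pairs.append(p)
--     answer = 0
--     j = n
--     for i in range(n):
--         while j > 0 and pairs[j - 1] >= k - pairs[i]:
--             j -= 1
--         if j < n and pairs[j] - pairs[i] >= k:
--             answer += n - j
--     return answer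
-- ===== Notes on version B (the rewrite author's own statement) =====
-- stated objective: faster
-- what changed: Replaces the per-index bisect_left over the monotone prefix-pairs array with a single downward-moving two-pointer (the search target k - pairs[i] only decreases), and builds the pairs array in one uniform dict pass instead of Counter(nums[:1]) plus an index loop.
import Mathlib
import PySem

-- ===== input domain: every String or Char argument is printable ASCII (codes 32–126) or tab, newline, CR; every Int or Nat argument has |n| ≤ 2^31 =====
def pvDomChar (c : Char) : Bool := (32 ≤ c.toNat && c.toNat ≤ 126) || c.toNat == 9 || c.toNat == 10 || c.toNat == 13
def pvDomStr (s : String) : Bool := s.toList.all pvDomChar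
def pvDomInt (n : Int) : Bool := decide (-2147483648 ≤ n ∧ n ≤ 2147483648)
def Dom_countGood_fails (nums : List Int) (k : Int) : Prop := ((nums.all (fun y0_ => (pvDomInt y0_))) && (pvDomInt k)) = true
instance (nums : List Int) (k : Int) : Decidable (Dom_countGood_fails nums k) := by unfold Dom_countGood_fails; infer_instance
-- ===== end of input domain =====

-- B replaces A's per-index bisect over the monotone prefix-pairs array by a single
-- downward-walking pointer (the search target k - pairs[i] only decreases): alternative mechanism, O(n log n) → O(n) after the prefix pass.

-- ===== PORT A =====
def countGood_fails (nums : List Int) (k : Int) : Int :=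
  let n := nums.length
  -- c = Counter(nums[:1])
  let c0 : PySem.Dict Int Int := PySem.Dict.counter (PySem.List.slice nums none (some 1))
  -- for i in range(1,n): c[nums[i]] += 1; pairs.append(pairs[-1] + c[nums[i]] - 1)
  -- (the updated dict is read back at key nums[i], exactly as Python re-reads c[nums[i]])
  let st := (PySem.List.pyRange 1 n 1).foldl
    (fun (st : PySem.Dict Int Int × List Int) i =>
      (st.1.modify (PySem.List.pyGetD nums i 0) 0 (· + 1),
       st.2 ++ [PySem.List.pyGetD st.2 (-1) 0 +
         (st.1.modify (PySem.List.pyGetD nums i 0) 0 (· + 1)).getD (PySem.List.pyGetD nums i 0) 0 - 1]))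
    (c0, [0])
  let pairs := st.2
  -- for i in range(n): j = bisect_left(pairs, k - pairs[i]); …
  (PySem.List.pyRange 0 n 1).foldl
    (fun answer i =>
      let pi := PySem.List.pyGetD pairs i 0
      let j := PySem.List.bisectLeft pairs (k - pi)
      if j < n ∧ PySem.List.pyGetD pairs (j : Int) 0 - pi ≥ k then
        answer + ((n : Int) - (j : Int))
      else answer)
    0

-- ===== PORT B =====
-- while j > 0 and pairs[j-1] >= t: j -= 1
def pvStepDown (pairs : List Int) (t : Int) : Nat → Nat
  | 0 => 0
  | j + 1 => if t ≤ pairs.getD j 0 then pvStepDown pairs t j else j + 1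

def countGood_fails_alt (nums : List Int) (k : Int) : Int :=
  let n := nums.length
  -- one pass: counts dict, running pair count p, pairs list
  let pairs := (nums.foldl
    (fun (st : PySem.Dict Int Int × Int × List Int) x =>
      let cnt := st.1.getD x 0 + 1
      let p := st.2.1 + cnt - 1
      (st.1.insert x cnt, p, st.2.2 ++ [p]))
    (PySem.Dict.empty, 0, [])).2.2
  -- two pointers: j only moves down
  let fin := (PySem.List.pyRange 0 n 1).foldl
    (fun (st : Int × Nat) i =>
      let pi := PySem.List.pyGetD pairs i 0
      let j := pvStepDown pairs (k - pi) st.2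
      if j < n ∧ PySem.List.pyGetD pairs (j : Int) 0 - pi ≥ k then
        (st.1 + ((n : Int) - (j : Int)), j)
      else (st.1, j))
    (0, n)
  fin.1

-- ===== PRECONDITION & SPEC =====
def Spec_countGood_fails (nums : List Int) (k : Int) (out : Int) : Prop := out = countGood_fails_alt nums k
instance (nums : List Int) (k : Int) (out : Int) : Decidable (Spec_countGood_fails nums k out) := by unfold Spec_countGood_fails; infer_instance

-- ===== CLAIM (what is proved, stated in full; the proofs are below) =====
def Claim_equal_countGood_fails : Prop := ∀ (nums : List Int) (k : Int), Dom_countGood_fails nums k → Spec_countGood_fails nums k (countGood_fails nums k)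

-- ===== LEMMAS AND PROOFS =====

-- reference build of the prefix-pairs list
def pvBuildP (c : PySem.Dict Int Int) (p : Int) : List Int → List Int
  | [] => []
  | x :: xs =>
    let cnt := c.getD x 0 + 1
    (p + cnt - 1) :: pvBuildP (c.insert x cnt) (p + cnt - 1) xs

theorem pvBuildP_length (xs : List Int) : ∀ c p, (pvBuildP c p xs).length = xs.length := by
  induction xs with
  | nil => intro c p; rfl
  | cons x xs ih => intro c p; simp [pvBuildP, ih]

-- B's fold builds acc ++ pvBuildP c p xs
theorem pvB_fold_eq (xs : List Int) : ∀ (c : PySem.Dict Int Int) (p : Int) (acc : List Int),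
    (xs.foldl (fun (st : PySem.Dict Int Int × Int × List Int) x =>
      let cnt := st.1.getD x 0 + 1
      let q := st.2.1 + cnt - 1
      (st.1.insert x cnt, q, st.2.2 ++ [q])) (c, p, acc)).2.2 = acc ++ pvBuildP c p xs := by
  induction xs with
  | nil => intro c p acc; simp [pvBuildP]
  | cons x xs ih => intro c p acc; simp [pvBuildP, ih]

-- A's fold builds acc ++ [p] ++ pvBuildP c p xs, given the dict agrees with c under getD
theorem pvA_fold_eq (xs : List Int) : ∀ (cA c : PySem.Dict Int Int) (p : Int) (acc : List Int),
    (∀ y, cA.getD y 0 = c.getD y 0) →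
    (xs.foldl (fun (st : PySem.Dict Int Int × List Int) x =>
      (st.1.modify x 0 (· + 1),
       st.2 ++ [PySem.List.pyGetD st.2 (-1) 0 +
         (st.1.modify x 0 (· + 1)).getD x 0 - 1])) (cA, acc ++ [p])).2
    = acc ++ [p] ++ pvBuildP c p xs := by
  induction xs with
  | nil => intro cA c p acc h; simp [pvBuildP]
  | cons x xs ih =>
    intro cA c p acc h
    simp only [List.foldl_cons, pvBuildP]
    rw [PySem.List.pyGetD_neg_one_append_singleton]
    rw [PySem.Dict.getD_modify_self, h x]
    have hnext : ∀ y, (cA.modify x 0 (· + 1)).getD y 0 = (c.insert x (c.getD x 0 + 1)).getD y 0 := by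
      intro y
      by_cases hy : y = x
      · rw [hy, PySem.Dict.getD_modify_self, PySem.Dict.getD_insert_self, h x]
      · rw [PySem.Dict.getD_modify_of_ne _ _ _ hy, PySem.Dict.getD_insert_of_ne _ _ _ hy, h y]
    have := ih (cA.modify x 0 (· + 1)) (c.insert x (c.getD x 0 + 1)) (p + (c.getD x 0 + 1) - 1) (acc ++ [p]) hnext
    simp only [List.append_assoc] at this ⊢
    exact this

-- A's fold over range(1, n) of indices is its fold over the dropped list
theorem pvA_range_to_drop (nums : List Int) : ∀ (cnt : Nat) (a : Int)
    (st0 : PySem.Dict Int Int × List Int), 0 ≤ a → a + cnt = nums.length →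
    (PySem.List.pyRange a (nums.length : Int) 1).foldl
      (fun (st : PySem.Dict Int Int × List Int) i =>
        (st.1.modify (PySem.List.pyGetD nums i 0) 0 (· + 1),
         st.2 ++ [PySem.List.pyGetD st.2 (-1) 0 +
           (st.1.modify (PySem.List.pyGetD nums i 0) 0 (· + 1)).getD (PySem.List.pyGetD nums i 0) 0 - 1])) st0
    = (nums.drop a.toNat).foldl
      (fun (st : PySem.Dict Int Int × List Int) x =>
        (st.1.modify x 0 (· + 1),
         st.2 ++ [PySem.List.pyGetD st.2 (-1) 0 +
           (st.1.modify x 0 (· + 1)).getD x 0 - 1])) st0 := by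
  intro cnt
  induction cnt with
  | zero =>
    intro a st0 ha h
    rw [PySem.List.pyRange_one_eq_nil (by omega), List.drop_of_length_le (by omega)]
    rfl
  | succ m ih =>
    intro a st0 ha h
    have hlt : a.toNat < nums.length := by omega
    rw [PySem.List.pyRange_one_cons (by omega), List.foldl_cons,
        List.drop_eq_getElem_cons hlt, List.foldl_cons]
    have hg : PySem.List.pyGetD nums a 0 = nums[a.toNat] := by
      rw [PySem.List.pyGetD_of_nonneg _ _ ha, List.getD_eq_getElem?_getD,
          List.getElem?_eq_getElem hlt]
      rfl
    rw [hg]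
    have := ih (a + 1) ((st0.1.modify nums[a.toNat] 0 (· + 1),
       st0.2 ++ [PySem.List.pyGetD st0.2 (-1) 0 +
         (st0.1.modify nums[a.toNat] 0 (· + 1)).getD nums[a.toNat] 0 - 1])) (by omega) (by omega)
    rw [show (a + 1).toNat = a.toNat + 1 from by omega] at this
    exact this

-- pvBuildP is a nondecreasing chain from p when the dict is nonnegative
theorem pvBuildP_chain (xs : List Int) : ∀ (c : PySem.Dict Int Int) (p : Int),
    (∀ y, 0 ≤ c.getD y 0) → List.IsChain (· ≤ ·) (p :: pvBuildP c p xs) := by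
  induction xs with
  | nil => intro c p h; simp [pvBuildP]
  | cons x xs ih =>
    intro c p h
    refine List.IsChain.cons_cons (by have := h x; omega) ?_
    refine ih _ _ ?_
    intro y
    by_cases hy : y = x
    · rw [hy, PySem.Dict.getD_insert_self]; have := h x; omega
    · rw [PySem.Dict.getD_insert_of_ne _ _ _ hy]; exact h y

-- pvStepDown reaches exactly bisectLeft on a sorted list, starting from any j0 above it
theorem pvStepDown_eq (P : List Int) (t : Int) (hs : P.Pairwise (· ≤ ·)) :
    ∀ j0, PySem.List.bisectLeft P t ≤ j0 → j0 ≤ P.length →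
      pvStepDown P t j0 = PySem.List.bisectLeft P t := by
  obtain ⟨hble, hlt, hge⟩ := PySem.List.bisectLeft_spec P t hs
  intro j0
  induction j0 with
  | zero => intro h1 _; simp only [pvStepDown]; omega
  | succ m ih =>
    intro h1 h2
    by_cases hm : PySem.List.bisectLeft P t ≤ m
    · have hmlen : m < P.length := by omega
      have : t ≤ P[m] := hge m hmlen hm
      simp only [pvStepDown]
      rw [if_pos (by rw [List.getD_eq_getElem?_getD, List.getElem?_eq_getElem hmlen]; simpa using this)]
      exact ih hm (by omega)
    · -- bisectLeft = m+1, so P[m] < t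
      have hb : PySem.List.bisectLeft P t = m + 1 := by omega
      have hmlen : m < P.length := by omega
      have hPm : P[m] < t := hlt m hmlen (by omega)
      simp only [pvStepDown]
      rw [if_neg (by rw [List.getD_eq_getElem?_getD, List.getElem?_eq_getElem hmlen]; simp; omega)]
      exact hb.symm

-- bisectLeft is monotone in the target (on a sorted list)
theorem pvBisect_mono (P : List Int) (hs : P.Pairwise (· ≤ ·)) (t t' : Int) (h : t' ≤ t) :
    PySem.List.bisectLeft P t' ≤ PySem.List.bisectLeft P t := by
  obtain ⟨hble, hlt, hge⟩ := PySem.List.bisectLeft_spec P t hs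
  obtain ⟨hble', hlt', hge'⟩ := PySem.List.bisectLeft_spec P t' hs
  by_contra hc
  push_neg at hc
  have hm : PySem.List.bisectLeft P t < P.length := by omega
  have h1 : P[PySem.List.bisectLeft P t] < t' := hlt' _ hm (by omega)
  have h2 : t ≤ P[PySem.List.bisectLeft P t] := hge _ hm (le_refl _)
  omega

-- sortedness as getD-monotonicity
theorem pvSorted_getD (P : List Int) (hs : P.Pairwise (· ≤ ·)) (a b : Nat)
    (hab : a ≤ b) (hb : b < P.length) : P.getD a 0 ≤ P.getD b 0 := by
  rw [List.getD_eq_getElem?_getD, List.getD_eq_getElem?_getD,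
      List.getElem?_eq_getElem (by omega : a < P.length), List.getElem?_eq_getElem hb]
  simp only [Option.getD_some]
  rcases Nat.eq_or_lt_of_le hab with h | h
  · subst h; rfl
  · exact List.pairwise_iff_getElem.mp hs a b _ hb h

-- the two second-phase loops agree, carrying the two-pointer invariant
theorem pvLoop_eq (P : List Int) (k : Int) (n : Nat) (hlen : P.length = n)
    (hs : P.Pairwise (· ≤ ·)) :
    ∀ (cnt : Nat) (a : Int) (answer : Int) (j0 : Nat), 0 ≤ a → a + cnt = n →
      j0 ≤ n → (cnt ≠ 0 → PySem.List.bisectLeft P (k - P.getD a.toNat 0) ≤ j0) →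
      ((PySem.List.pyRange a n 1).foldl
        (fun (st : Int × Nat) i =>
          let pi := PySem.List.pyGetD P i 0
          let j := pvStepDown P (k - pi) st.2
          if j < n ∧ PySem.List.pyGetD P (j : Int) 0 - pi ≥ k then
            (st.1 + ((n : Int) - (j : Int)), j)
          else (st.1, j)) (answer, j0)).1
      = (PySem.List.pyRange a n 1).foldl
        (fun answer i =>
          let pi := PySem.List.pyGetD P i 0
          let j := PySem.List.bisectLeft P (k - pi)
          if j < n ∧ PySem.List.pyGetD P (j : Int) 0 - pi ≥ k then
            answer + ((n : Int) - (j : Int))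
          else answer) answer := by
  intro cnt
  induction cnt with
  | zero =>
    intro a answer j0 ha hcnt hj0 _
    rw [PySem.List.pyRange_one_eq_nil (by omega)]
    rfl
  | succ m ih =>
    intro a answer j0 ha hcnt hj0 hbl
    rw [PySem.List.pyRange_one_cons (by omega)]
    simp only [List.foldl_cons]
    have hpa : PySem.List.pyGetD P a 0 = P.getD a.toNat 0 := by
      rw [PySem.List.pyGetD_of_nonneg _ _ ha]
    have hsd : pvStepDown P (k - PySem.List.pyGetD P a 0) j0
        = PySem.List.bisectLeft P (k - PySem.List.pyGetD P a 0) := by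
      rw [hpa]
      exact pvStepDown_eq P _ hs j0 (hbl (by omega)) (by omega)
    rw [hsd]
    set j := PySem.List.bisectLeft P (k - PySem.List.pyGetD P a 0) with hj
    have hjle : j ≤ n := by
      have := (PySem.List.bisectLeft_spec P (k - PySem.List.pyGetD P a 0) hs).1
      omega
    have hnext : m ≠ 0 → PySem.List.bisectLeft P (k - P.getD (a + 1).toNat 0) ≤ j := by
      intro hm
      rw [hj, hpa]
      refine pvBisect_mono P hs _ _ ?_
      have : P.getD a.toNat 0 ≤ P.getD (a + 1).toNat 0 := by
        refine pvSorted_getD P hs a.toNat (a + 1).toNat (by omega) (by omega)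
      omega
    by_cases hcond : j < n ∧ PySem.List.pyGetD P (j : Int) 0 - PySem.List.pyGetD P a 0 ≥ k
    · rw [if_pos hcond, if_pos hcond]
      exact ih (a + 1) _ j (by omega) (by omega) hjle hnext
    · rw [if_neg hcond, if_neg hcond]
      exact ih (a + 1) _ j (by omega) (by omega) hjle hnext

-- counter of a one-element slice agrees (under getD) with inserting count 1
theorem pvCounter_one (x y : Int) :
    (PySem.Dict.counter [x]).getD y 0 = ((PySem.Dict.empty : PySem.Dict Int Int).insert x (0 + 1)).getD y 0 := by
  rw [PySem.Dict.getD_counter]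
  by_cases hy : y = x
  · rw [hy, PySem.Dict.getD_insert_self]; simp
  · rw [PySem.Dict.getD_insert_of_ne _ _ _ hy]
    have hxy : ¬ x = y := fun h => hy h.symm
    simp only [PySem.Dict.getD_empty, List.count_singleton, beq_iff_eq, if_neg hxy]
    rfl

-- ===== VERDICT (by name: the statement is the Claim_ definition above) =====
theorem countGood_fails_spec : Claim_equal_countGood_fails := by
  unfold Claim_equal_countGood_fails
  intro nums k _
  unfold Spec_countGood_fails
  cases nums with
  | nil => rfl
  | cons x rest =>
    -- the common prefix-pairs list
    have hc1 : ∀ y, (PySem.Dict.counter [x]).getD y 0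
        = ((PySem.Dict.empty : PySem.Dict Int Int).insert x (0 + 1)).getD y 0 :=
      fun y => pvCounter_one x y
    have hnn : ∀ y, 0 ≤ ((PySem.Dict.empty : PySem.Dict Int Int).insert x (0 + 1)).getD y 0 := by
      intro y
      by_cases hy : y = x
      · rw [hy, PySem.Dict.getD_insert_self]; norm_num
      · rw [PySem.Dict.getD_insert_of_ne _ _ _ hy, PySem.Dict.getD_empty]
    have hlen : ((0 : Int) :: pvBuildP ((PySem.Dict.empty : PySem.Dict Int Int).insert x (0 + 1)) 0 rest).length
        = (x :: rest).length := by
      simp [pvBuildP_length]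
    have hsort : ((0 : Int) :: pvBuildP ((PySem.Dict.empty : PySem.Dict Int Int).insert x (0 + 1)) 0 rest).Pairwise (· ≤ ·) :=
      (pvBuildP_chain rest _ 0 hnn).pairwise
    -- A's pairs list
    have hA : ((PySem.List.pyRange 1 (((x :: rest).length : Nat) : Int) 1).foldl
        (fun (st : PySem.Dict Int Int × List Int) i =>
          (st.1.modify (PySem.List.pyGetD (x :: rest) i 0) 0 (· + 1),
           st.2 ++ [PySem.List.pyGetD st.2 (-1) 0 +
             (st.1.modify (PySem.List.pyGetD (x :: rest) i 0) 0 (· + 1)).getD (PySem.List.pyGetD (x :: rest) i 0) 0 - 1]))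
        (PySem.Dict.counter (PySem.List.slice (x :: rest) none (some 1)), [0])).2
        = (0 : Int) :: pvBuildP ((PySem.Dict.empty : PySem.Dict Int Int).insert x (0 + 1)) 0 rest := by
      have hs1 : PySem.List.slice (x :: rest) none (some 1) = [x] := by
        rw [PySem.List.slice_to _ (by norm_num)]
        rfl
      rw [hs1]
      rw [pvA_range_to_drop (x :: rest) rest.length 1 _ (by norm_num) (by simp only [List.length_cons]; omega)]
      have := pvA_fold_eq ((x :: rest).drop 1) (PySem.Dict.counter [x])
        ((PySem.Dict.empty : PySem.Dict Int Int).insert x (0 + 1)) 0 [] hc1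
      simp only [List.nil_append] at this
      rw [show ((1 : Int)).toNat = 1 from rfl]
      exact this
    -- B's pairs list
    have hB : ((x :: rest).foldl
        (fun (st : PySem.Dict Int Int × Int × List Int) y =>
          let cnt := st.1.getD y 0 + 1
          let p := st.2.1 + cnt - 1
          (st.1.insert y cnt, p, st.2.2 ++ [p]))
        (PySem.Dict.empty, 0, [])).2.2
        = (0 : Int) :: pvBuildP ((PySem.Dict.empty : PySem.Dict Int Int).insert x (0 + 1)) 0 rest := by
      rw [pvB_fold_eq]
      simp only [pvBuildP, PySem.Dict.getD_empty, List.nil_append]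
      norm_num
    -- both programs, stated over their pairs terms (definitional)
    show (PySem.List.pyRange 0 (((x :: rest).length : Nat) : Int) 1).foldl
        (fun answer i =>
          let pi := PySem.List.pyGetD _ i 0
          let j := PySem.List.bisectLeft _ (k - pi)
          if j < (x :: rest).length ∧ PySem.List.pyGetD _ (j : Int) 0 - pi ≥ k then
            answer + (((x :: rest).length : Int) - (j : Int))
          else answer) 0
      = ((PySem.List.pyRange 0 (((x :: rest).length : Nat) : Int) 1).foldl
        (fun (st : Int × Nat) i =>
          let pi := PySem.List.pyGetD _ i 0
          let j := pvStepDown _ (k - pi) st.2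
          if j < (x :: rest).length ∧ PySem.List.pyGetD _ (j : Int) 0 - pi ≥ k then
            (st.1 + (((x :: rest).length : Int) - (j : Int)), j)
          else (st.1, j)) (0, (x :: rest).length)).1
    rw [hA, hB]
    exact (pvLoop_eq _ k _ hlen hsort ((x :: rest).length) 0 0 ((x :: rest).length)
      (by norm_num) (by norm_num) (le_refl _)
      (fun _ => by
        have := (PySem.List.bisectLeft_spec _ (k - ((0 : Int) :: pvBuildP ((PySem.Dict.empty : PySem.Dict Int Int).insert x (0 + 1)) 0 rest).getD (0 : Int).toNat 0) hsort).1
        omega)).symm
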